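-- pv_equiv track=rewrite | github.com/crazybass81/T-Developer | backend/src/agents/unified/parser/modules/entity_extractor.py | _identify_roles
-- ===== SOURCE A (Python) =====
-- from collections import defaultdict
-- from typing import Any, Dict, List, Optional, Set, Tuple
--
-- def _identify_roles(
--     entities: Dict[str, List[Dict]], sentences: List[str]
-- ) -> Dict[str, List[str]]:
--     """Identify roles of entities"""
--     roles = defaultdict(list)
--
--     for category, entity_list in entities.items():
--         for entity in entity_list:
--             entity_roles = []
--
--             # Check in sentences
--             for sentence in sentences:
--                 if entity["text"] in sentence.lower():
--                     # Identify role based on context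
--                     if "create" in sentence or "add" in sentence:
--                         entity_roles.append("creator")
--                     if "manage" in sentence or "control" in sentence:
--                         entity_roles.append("manager")
--                     if "view" in sentence or "read" in sentence:
--                         entity_roles.append("viewer")
--                     if "approve" in sentence or "authorize" in sentence:
--                         entity_roles.append("approver")
--
--             if entity_roles:
--                 roles[entity["text"]] = list(set(entity_roles))
--
--     return dict(roles)
-- ===== SOURCE B (Python) =====
-- def _identify_roles(entities, sentences):
--     """Identify roles of entities (sentence-major pass over a precomputed bucket table)."""
--     buckets = {}
--     for entity_list in entities.values():
--         for entity in entity_list: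
--             buckets.setdefault(entity["text"], set())
--     for sentence in sentences:
--         rs = set()
--         if "create" in sentence or "add" in sentence:
--             rs.add("creator")
--         if "manage" in sentence or "control" in sentence:
--             rs.add("manager")
--         if "view" in sentence or "read" in sentence:
--             rs.add("viewer")
--         if "approve" in sentence or "authorize" in sentence:
--             rs.add("approver")
--         low = sentence.lower()
--         buckets = {t: acc | rs if t in low else acc for t, acc in buckets.items()}
--     return {t: list(acc) for t, acc in buckets.items() if acc}
-- ===== Notes on version B (the rewrite author's own statement) =====
-- stated objective: alternative
-- what changed: A rescans every sentence (re-lowercasing it and re-testing the eight keywords) once per entity and dedups each entity's role list at the end; B dedups the entity texts once, computes each sentence's lowercase form and role set exactly once, and makes one sentence-major pass that unions those precomputed role sets into per-text buckets.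
-- outside the precondition, e.g. on _identify_roles({'a': [{}]}, ['create x']): A raises KeyError, B raises KeyError; on _identify_roles({'a': [{}]}, []): A returns {}, B raises KeyError
import Mathlib
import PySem

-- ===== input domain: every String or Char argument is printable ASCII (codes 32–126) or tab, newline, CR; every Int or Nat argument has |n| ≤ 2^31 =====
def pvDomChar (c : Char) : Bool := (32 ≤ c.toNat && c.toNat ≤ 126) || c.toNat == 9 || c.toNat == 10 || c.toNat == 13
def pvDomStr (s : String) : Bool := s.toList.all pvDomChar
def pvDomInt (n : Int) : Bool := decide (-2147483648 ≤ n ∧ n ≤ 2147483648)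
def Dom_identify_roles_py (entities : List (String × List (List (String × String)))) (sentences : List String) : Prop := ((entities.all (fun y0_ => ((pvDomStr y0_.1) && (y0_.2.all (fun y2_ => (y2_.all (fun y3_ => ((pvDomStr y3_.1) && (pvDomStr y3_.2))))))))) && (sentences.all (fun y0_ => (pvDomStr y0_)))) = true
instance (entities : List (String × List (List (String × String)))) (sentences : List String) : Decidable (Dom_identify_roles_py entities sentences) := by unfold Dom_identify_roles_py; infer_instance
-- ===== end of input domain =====

-- B replaces A's per-entity rescan of every sentence by one dedup pass over the entities and one
-- sentence-major pass that unions each sentence's precomputed role set into per-text buckets (objective: alternative).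

-- ===== PORT A =====
-- Literal transliteration of _identify_roles.  entity["text"] (KeyError when absent) is the
-- skipped `none` branch — Pre_ excludes such inputs.  list(set(entity_roles)) is ported as
-- PySem.Set.ofList (first-insertion order): exact as a set; as a LIST it is exact on Pre_,
-- which keeps at most one distinct role per text (Python's list(set) order is hash order).
def identify_roles_py (entities : List (String × List (List (String × String)))) (sentences : List String) : List (String × List String) :=
  let roles : PySem.Dict String (List String) :=
    entities.foldl (fun roles catlist =>
      catlist.2.foldl (fun roles entity =>
        match (PySem.Dict.mk entity).get? "text" with
        | none => roles
        | some t =>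
          let entity_roles : List String :=
            sentences.foldl (fun er sentence =>
              if PySem.Str.isIn t (PySem.Str.lower sentence) then
                let er := if PySem.Str.isIn "create" sentence || PySem.Str.isIn "add" sentence then er ++ ["creator"] else er
                let er := if PySem.Str.isIn "manage" sentence || PySem.Str.isIn "control" sentence then er ++ ["manager"] else er
                let er := if PySem.Str.isIn "view" sentence || PySem.Str.isIn "read" sentence then er ++ ["viewer"] else er
                let er := if PySem.Str.isIn "approve" sentence || PySem.Str.isIn "authorize" sentence then er ++ ["approver"] else er
                er
              else er) []
          if entity_roles ≠ [] then roles.insert t (PySem.Set.ofList entity_roles) else roles)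
        roles)
      PySem.Dict.empty
  roles.items

-- ===== PORT B =====
-- rs = the role set one sentence contributes (Source B's four conditional adds)
def pvSentenceRoles (sentence : String) : PySem.Set String :=
  let rs : PySem.Set String := PySem.Set.empty
  let rs := if PySem.Str.isIn "create" sentence || PySem.Str.isIn "add" sentence then PySem.Set.add rs "creator" else rs
  let rs := if PySem.Str.isIn "manage" sentence || PySem.Str.isIn "control" sentence then PySem.Set.add rs "manager" else rs
  let rs := if PySem.Str.isIn "view" sentence || PySem.Str.isIn "read" sentence then PySem.Set.add rs "viewer" else rs
  let rs := if PySem.Str.isIn "approve" sentence || PySem.Str.isIn "authorize" sentence then PySem.Set.add rs "approver" else rs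
  rs

-- Transliteration of Source B: seed buckets with setdefault, one sentence-major pass rebuilding the
-- bucket dict, then keep the non-empty buckets.  list(acc) is the Set's list (exact on Pre_ as above).
def identify_roles_py_alt (entities : List (String × List (List (String × String)))) (sentences : List String) : List (String × List String) :=
  let buckets : PySem.Dict String (PySem.Set String) :=
    entities.foldl (fun b catlist =>
      catlist.2.foldl (fun b entity =>
        match (PySem.Dict.mk entity).get? "text" with
        | none => b
        | some t => b.setdefault t PySem.Set.empty) b)
      PySem.Dict.empty
  let buckets : PySem.Dict String (PySem.Set String) :=
    sentences.foldl (fun b sentence =>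
      let rs := pvSentenceRoles sentence
      let low := PySem.Str.lower sentence
      PySem.Dict.mk (b.items.map (fun p => (p.1, if PySem.Str.isIn p.1 low then PySem.Set.union p.2 rs else p.2)))) buckets
  buckets.items.filterMap (fun p => if p.2 ≠ [] then some (p.1, p.2) else none)

-- ===== PRECONDITION & SPEC =====
def pvRoleCount (t : String) (sentences : List String) : Nat :=
  (([("create", "add"), ("manage", "control"), ("view", "read"), ("approve", "authorize")] : List (String × String)).filter
    (fun kw => sentences.any (fun s => PySem.Str.isIn t (PySem.Str.lower s) && (PySem.Str.isIn kw.1 s || PySem.Str.isIn kw.2 s)))).length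

def pvEntityOK (e : List (String × String)) (sentences : List String) : Bool :=
  match (PySem.Dict.mk e).get? "text" with
  | none => false
  | some t => pvRoleCount t sentences ≤ 1

-- Pre_ excludes (a) entities without a "text" key: A raises KeyError on them as soon as sentences
-- is non-empty (with no sentences it returns {} without touching them), while B's bucket-seeding
-- pass always reads "text" and raises, and
-- (b) inputs where some entity's text triggers two or more role keywords, on which the ORDER of
-- A's returned role list is Python's set-iteration (hash) order — an accidental corner with no
-- determinate value to match.
def Pre_identify_roles_py (entities : List (String × List (List (String × String)))) (sentences : List String) : Prop :=
  entities.all (fun p => p.2.all (fun e => pvEntityOK e sentences)) = true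
instance (entities : List (String × List (List (String × String)))) (sentences : List String) : Decidable (Pre_identify_roles_py entities sentences) := by unfold Pre_identify_roles_py; infer_instance

def pvWitness_identify_roles_py : (List (String × List (List (String × String)))) × List String :=
  ([("user", [[("text", "admin")]])], ["create admin account"])

def Spec_identify_roles_py (entities : List (String × List (List (String × String)))) (sentences : List String) (out : List (String × List String)) : Prop := out = identify_roles_py_alt entities sentences
instance (entities : List (String × List (List (String × String)))) (sentences : List String) (out : List (String × List String)) : Decidable (Spec_identify_roles_py entities sentences out) := by unfold Spec_identify_roles_py; infer_instance

-- ===== CLAIM (what is proved, stated in full; the proofs are below) =====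
def Claim_equal_identify_roles_py : Prop := ∀ (entities : List (String × List (List (String × String)))) (sentences : List String), Dom_identify_roles_py entities sentences → Pre_identify_roles_py entities sentences → Spec_identify_roles_py entities sentences (identify_roles_py entities sentences)

-- ===== LEMMAS AND PROOFS =====

-- proof-side definitions and lemmas
def pvTs (entities : List (String × List (List (String × String)))) : List String :=
  entities.flatMap (fun p => p.2.filterMap (fun e => (PySem.Dict.mk e).get? "text"))

def pvRsl (s : String) : List String :=
  (if PySem.Str.isIn "create" s || PySem.Str.isIn "add" s then ["creator"] else []) ++
  (if PySem.Str.isIn "manage" s || PySem.Str.isIn "control" s then ["manager"] else []) ++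
  (if PySem.Str.isIn "view" s || PySem.Str.isIn "read" s then ["viewer"] else []) ++
  (if PySem.Str.isIn "approve" s || PySem.Str.isIn "authorize" s then ["approver"] else [])
def pvEr (t : String) (sentences : List String) : List String :=
  sentences.flatMap (fun s => if PySem.Str.isIn t (PySem.Str.lower s) then pvRsl s else [])
def pvV (t : String) (sentences : List String) : List String := PySem.Set.ofList (pvEr t sentences)
def pvCanon (ts : List String) (sentences : List String) : List (String × List String) :=
  (PySem.Set.ofList ts).filterMap (fun t => if pvV t sentences ≠ [] then some (t, pvV t sentences) else none)
lemma pv_sentenceRoles_eq (s : String) : pvSentenceRoles s = pvRsl s := by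
  unfold pvSentenceRoles pvRsl
  split_ifs <;> rfl

lemma pv_inner_er (t : String) (sentences : List String) :
    sentences.foldl (fun er sentence =>
      if PySem.Str.isIn t (PySem.Str.lower sentence) then
        let er := if PySem.Str.isIn "create" sentence || PySem.Str.isIn "add" sentence then er ++ ["creator"] else er
        let er := if PySem.Str.isIn "manage" sentence || PySem.Str.isIn "control" sentence then er ++ ["manager"] else er
        let er := if PySem.Str.isIn "view" sentence || PySem.Str.isIn "read" sentence then er ++ ["viewer"] else er
        let er := if PySem.Str.isIn "approve" sentence || PySem.Str.isIn "authorize" sentence then er ++ ["approver"] else er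
        er
      else er) []
    = pvEr t sentences := by
  rw [PySem.List.foldl_congr_mem _ _ (fun er s => er ++ (if PySem.Str.isIn t (PySem.Str.lower s) then pvRsl s else [])) []
    (by
      intro acc x _
      by_cases h : PySem.Str.isIn t (PySem.Str.lower x) = true
      · simp only [if_pos h, pvRsl]; split_ifs <;> simp
      · simp only [if_neg h]; simp)]
  rw [PySem.List.foldl_append_eq_flatMap]
  simp [pvEr]

lemma pv_mem_canon (ts sentences : List String) (p : String × List String) (hp : p ∈ pvCanon ts sentences) :
    p = (p.1, pvV p.1 sentences) := by
  obtain ⟨u, hu, heq⟩ := List.mem_filterMap.mp hp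
  by_cases h : pvV u sentences ≠ []
  · rw [if_pos h] at heq
    have h2 := Option.some.inj heq
    simp [← h2]
  · rw [if_neg h] at heq; cases heq

lemma pv_canon_keys (ts sentences : List String) (t : String) :
    t ∈ (pvCanon ts sentences).map Prod.fst ↔ t ∈ ts ∧ pvV t sentences ≠ [] := by
  constructor
  · intro h
    obtain ⟨p, hp, hp1⟩ := List.mem_map.mp h
    obtain ⟨u, hu, heq⟩ := List.mem_filterMap.mp hp
    by_cases hv : pvV u sentences ≠ []
    · rw [if_pos hv] at heq
      have : p = (u, pvV u sentences) := (Option.some.inj heq).symm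
      subst this
      simp at hp1
      subst hp1
      exact ⟨(PySem.Set.mem_ofList _ _).mp hu, hv⟩
    · rw [if_neg hv] at heq; cases heq
  · rintro ⟨ht, hv⟩
    exact List.mem_map.mpr ⟨(t, pvV t sentences),
      List.mem_filterMap.mpr ⟨t, (PySem.Set.mem_ofList _ _).mpr ht, by rw [if_pos hv]⟩, rfl⟩

lemma pv_bucket_v (t : String) (sentences : List String) (L : List String) :
    sentences.foldl (fun acc s =>
      if PySem.Str.isIn t (PySem.Str.lower s) then PySem.Set.union acc (pvSentenceRoles s) else acc)
      (PySem.Set.ofList L)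
    = PySem.Set.ofList (L ++ pvEr t sentences) := by
  induction sentences generalizing L with
  | nil => simp [pvEr]
  | cons s rest ih =>
    simp only [List.foldl_cons]
    by_cases h : PySem.Str.isIn t (PySem.Str.lower s) = true
    · rw [if_pos h]
      have hu : PySem.Set.union (PySem.Set.ofList L) (pvSentenceRoles s) = PySem.Set.ofList (L ++ pvRsl s) := by
        rw [pv_sentenceRoles_eq]
        simp [PySem.Set.union, PySem.Set.update, PySem.Set.ofList_eq_foldl, List.foldl_append]
      rw [hu, ih]
      have h' : PySem.Chars.isIn t.toList (PySem.Chars.lower s.toList) = true := by simpa using h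
      simp [pvEr, h']
    · rw [if_neg h, ih]
      have h' : ¬ PySem.Chars.isIn t.toList (PySem.Chars.lower s.toList) = true := by simpa using h
      simp [pvEr, h']

lemma pv_ofList_append_singleton {α : Type} [BEq α] [LawfulBEq α] (l : List α) (t : α) :
    PySem.Set.ofList (l ++ [t]) = if t ∈ l then PySem.Set.ofList l else PySem.Set.ofList l ++ [t] := by
  have h1 : PySem.Set.ofList (l ++ [t]) = PySem.Set.add (PySem.Set.ofList l) t := by
    simp [PySem.Set.ofList_eq_foldl, List.foldl_append]
  rw [h1]
  by_cases h : t ∈ l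
  · rw [if_pos h]; simp [PySem.Set.add]; exact h
  · rw [if_neg h]; simp [PySem.Set.add]; exact h

lemma pv_v_ne (t : String) (sentences : List String) :
    pvV t sentences ≠ [] ↔ pvEr t sentences ≠ [] := by
  unfold pvV
  cases h : pvEr t sentences with
  | nil => simp [PySem.Set.ofList]
  | cons x xs =>
    have hx : x ∈ PySem.Set.ofList (x :: xs) := (PySem.Set.mem_ofList _ _).mpr (List.mem_cons_self)
    simp [List.ne_nil_of_mem hx]

lemma pv_canon_append_singleton (pre : List String) (t : String) (sentences : List String) :
    pvCanon (pre ++ [t]) sentences =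
      if t ∈ pre then pvCanon pre sentences
      else pvCanon pre sentences ++ (if pvV t sentences ≠ [] then [(t, pvV t sentences)] else []) := by
  unfold pvCanon
  rw [pv_ofList_append_singleton]
  by_cases h : t ∈ pre
  · rw [if_pos h, if_pos h]
  · rw [if_neg h, if_neg h, List.filterMap_append]
    congr 1
    by_cases hv : pvV t sentences ≠ [] <;> simp [hv]

lemma pv_A_fold (sentences : List String) (ts pre : List String) :
    ts.foldl (fun d t => if pvEr t sentences ≠ [] then d.insert t (PySem.Set.ofList (pvEr t sentences)) else d)
      (PySem.Dict.mk (pvCanon pre sentences))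
    = PySem.Dict.mk (pvCanon (pre ++ ts) sentences) := by
  induction ts generalizing pre with
  | nil => simp
  | cons t ts ih =>
    simp only [List.foldl_cons]
    have hkeys : (PySem.Dict.mk (pvCanon pre sentences)).keys = (pvCanon pre sentences).map Prod.fst := rfl
    have hstep : (if pvEr t sentences ≠ [] then (PySem.Dict.mk (pvCanon pre sentences)).insert t (PySem.Set.ofList (pvEr t sentences)) else PySem.Dict.mk (pvCanon pre sentences))
        = PySem.Dict.mk (pvCanon (pre ++ [t]) sentences) := by
      by_cases hv : pvEr t sentences ≠ []
      · rw [if_pos hv]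
        have hvv : pvV t sentences ≠ [] := (pv_v_ne t sentences).mpr hv
        by_cases hmem : t ∈ pre
        · have hc : (PySem.Dict.mk (pvCanon pre sentences)).contains t = true := by
            rw [PySem.Dict.contains_iff_mem_keys, hkeys]
            exact (pv_canon_keys pre sentences t).mpr ⟨hmem, hvv⟩
          apply PySem.Dict.ext
          rw [PySem.Dict.items_insert_of_contains _ _ hc]
          show (pvCanon pre sentences).map _ = (pvCanon (pre ++ [t]) sentences)
          rw [pv_canon_append_singleton, if_pos hmem]
          have : ∀ p ∈ pvCanon pre sentences,
              (if (p.1 == t) = true then (t, PySem.Set.ofList (pvEr t sentences)) else p) = p := by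
            intro p hp
            by_cases hpt : (p.1 == t) = true
            · rw [if_pos hpt]
              have hpe : p.1 = t := by simpa using hpt
              rw [pv_mem_canon pre sentences p hp]
              rw [hpe]
              rfl
            · rw [if_neg hpt]
          rw [List.map_congr_left this]
          simp
        · have hc : (PySem.Dict.mk (pvCanon pre sentences)).contains t = false := by
            rw [Bool.eq_false_iff]
            intro hcc
            rw [PySem.Dict.contains_iff_mem_keys, hkeys] at hcc
            exact hmem ((pv_canon_keys pre sentences t).mp hcc).1
          apply PySem.Dict.ext
          rw [PySem.Dict.items_insert_of_not_contains _ _ hc]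
          show pvCanon pre sentences ++ [(t, PySem.Set.ofList (pvEr t sentences))] = _
          rw [pv_canon_append_singleton, if_neg hmem, if_pos hvv]
          rfl
      · rw [if_neg hv]
        have hvv : ¬ pvV t sentences ≠ [] := fun hh => hv ((pv_v_ne t sentences).mp hh)
        rw [pv_canon_append_singleton]
        by_cases hmem : t ∈ pre
        · rw [if_pos hmem]
        · rw [if_neg hmem, if_neg hvv, List.append_nil]
    rw [hstep, ih]
    simp

lemma pv_B_phase1 (ts S : List String) :
    ts.foldl (fun d t => d.setdefault t PySem.Set.empty)
      (PySem.Dict.mk (S.map (fun t => (t, (PySem.Set.empty : PySem.Set String)))))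
    = PySem.Dict.mk ((PySem.Set.update S ts).map (fun t => (t, (PySem.Set.empty : PySem.Set String)))) := by
  induction ts generalizing S with
  | nil => simp [PySem.Set.update]
  | cons t ts ih =>
    simp only [List.foldl_cons]
    have hkeys : (PySem.Dict.mk (S.map (fun t => (t, (PySem.Set.empty : PySem.Set String))))).keys = S := by
      show (S.map _).map Prod.fst = S
      rw [List.map_map]
      exact List.map_congr_left (fun x _ => rfl) |>.trans (List.map_id _)
    have hupd : PySem.Set.update S (t :: ts) = PySem.Set.update (PySem.Set.add S t) ts := by
      simp [PySem.Set.update]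
    by_cases h : t ∈ S
    · have hc : (PySem.Dict.mk (S.map (fun t => (t, (PySem.Set.empty : PySem.Set String))))).contains t = true := by
        rw [PySem.Dict.contains_iff_mem_keys, hkeys]; exact h
      rw [PySem.Dict.setdefault_of_contains _ _ hc, hupd]
      have hadd : PySem.Set.add S t = S := by simp [PySem.Set.add]; exact h
      rw [hadd]
      exact ih S
    · have hc : (PySem.Dict.mk (S.map (fun t => (t, (PySem.Set.empty : PySem.Set String))))).contains t = false := by
        rw [Bool.eq_false_iff]
        intro hcc
        rw [PySem.Dict.contains_iff_mem_keys, hkeys] at hcc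
        exact h hcc
      rw [PySem.Dict.setdefault_of_not_contains _ _ hc, hupd]
      have hadd : PySem.Set.add S t = S ++ [t] := by simp [PySem.Set.add]; exact h
      rw [hadd]
      have : (PySem.Dict.mk (S.map (fun t => (t, (PySem.Set.empty : PySem.Set String))))).insert t PySem.Set.empty
          = PySem.Dict.mk ((S ++ [t]).map (fun t => (t, (PySem.Set.empty : PySem.Set String)))) := by
        apply PySem.Dict.ext
        rw [PySem.Dict.items_insert_of_not_contains _ _ hc]
        simp
      rw [this]
      exact ih (S ++ [t])

lemma pv_B_phase2 (sentences : List String) (T : List String) (F : String → PySem.Set String) :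
    sentences.foldl (fun b sentence =>
      let rs := pvSentenceRoles sentence
      let low := PySem.Str.lower sentence
      PySem.Dict.mk (b.items.map (fun p => (p.1, if PySem.Str.isIn p.1 low then PySem.Set.union p.2 rs else p.2))))
      (PySem.Dict.mk (T.map (fun t => (t, F t))))
    = PySem.Dict.mk (T.map (fun t => (t, sentences.foldl (fun acc s =>
        if PySem.Str.isIn t (PySem.Str.lower s) then PySem.Set.union acc (pvSentenceRoles s) else acc) (F t)))) := by
  induction sentences generalizing F with
  | nil => rfl
  | cons s rest ih =>
    simp only [List.foldl_cons]
    have hstep : (PySem.Dict.mk ((T.map (fun t => (t, F t))).map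
          (fun p => (p.1, if PySem.Str.isIn p.1 (PySem.Str.lower s) then PySem.Set.union p.2 (pvSentenceRoles s) else p.2))))
        = PySem.Dict.mk (T.map (fun t => (t, if PySem.Str.isIn t (PySem.Str.lower s) then PySem.Set.union (F t) (pvSentenceRoles s) else F t))) := by
      rw [List.map_map]
      rfl
    rw [hstep]
    exact ih _


lemma pv_nested_fold {ν : Type} (entities : List (String × List (List (String × String)))) (step : ν → String → ν) (init : ν) :
    entities.foldl (fun d p =>
      p.2.foldl (fun d e =>
        match (PySem.Dict.mk e).get? "text" with
        | none => d
        | some t => step d t) d) init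
    = (pvTs entities).foldl step init := by
  unfold pvTs
  rw [List.flatMap_def, List.foldl_flatten, List.foldl_map]
  apply PySem.List.foldl_congr_mem
  intro acc p _
  induction p.2 generalizing acc with
  | nil => rfl
  | cons e es ih => cases h : (PySem.Dict.mk e).get? "text" <;> simp [h, ih]


theorem pv_A_eq_canon (entities : List (String × List (List (String × String)))) (sentences : List String) :
    identify_roles_py entities sentences = pvCanon (pvTs entities) sentences := by
  unfold identify_roles_py
  rw [pv_nested_fold entities _ PySem.Dict.empty]
  have hcongr : (pvTs entities).foldl (fun roles t =>
      let entity_roles : List String :=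
        sentences.foldl (fun er sentence =>
          if PySem.Str.isIn t (PySem.Str.lower sentence) then
            let er := if PySem.Str.isIn "create" sentence || PySem.Str.isIn "add" sentence then er ++ ["creator"] else er
            let er := if PySem.Str.isIn "manage" sentence || PySem.Str.isIn "control" sentence then er ++ ["manager"] else er
            let er := if PySem.Str.isIn "view" sentence || PySem.Str.isIn "read" sentence then er ++ ["viewer"] else er
            let er := if PySem.Str.isIn "approve" sentence || PySem.Str.isIn "authorize" sentence then er ++ ["approver"] else er
            er
          else er) []
      if entity_roles ≠ [] then roles.insert t (PySem.Set.ofList entity_roles) else roles) PySem.Dict.empty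
      = (pvTs entities).foldl (fun d t => if pvEr t sentences ≠ [] then d.insert t (PySem.Set.ofList (pvEr t sentences)) else d) PySem.Dict.empty := by
    apply PySem.List.foldl_congr_mem
    intro acc t _
    simp only [pv_inner_er t sentences]
  rw [hcongr]
  have hempty : (PySem.Dict.empty : PySem.Dict String (List String)) = PySem.Dict.mk (pvCanon [] sentences) := rfl
  rw [hempty, pv_A_fold sentences (pvTs entities) []]
  rfl

theorem pv_B_eq_canon (entities : List (String × List (List (String × String)))) (sentences : List String) :
    identify_roles_py_alt entities sentences = pvCanon (pvTs entities) sentences := by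
  unfold identify_roles_py_alt
  simp only []
  rw [pv_nested_fold entities _ PySem.Dict.empty]
  have hempty : (PySem.Dict.empty : PySem.Dict String (PySem.Set String)) = PySem.Dict.mk (([] : List String).map (fun t => (t, (PySem.Set.empty : PySem.Set String)))) := rfl
  rw [hempty, pv_B_phase1 (pvTs entities) []]
  have hT : PySem.Set.update ([] : List String) (pvTs entities) = PySem.Set.ofList (pvTs entities) := by
    rw [PySem.Set.ofList_eq_foldl]; rfl
  rw [hT, pv_B_phase2 sentences _ (fun _ => PySem.Set.empty)]
  have hval : ∀ t ∈ PySem.Set.ofList (pvTs entities), (t, sentences.foldl (fun acc s =>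
        if PySem.Str.isIn t (PySem.Str.lower s) then PySem.Set.union acc (pvSentenceRoles s) else acc) (PySem.Set.empty : PySem.Set String)) = (t, pvV t sentences) := by
    intro t _
    have := pv_bucket_v t sentences []
    simp only [PySem.Set.ofList] at this
    rw [show (PySem.Set.empty : PySem.Set String) = PySem.Set.ofList [] from rfl, pv_bucket_v t sentences []]
    rfl
  show (((PySem.Set.ofList (pvTs entities)).map _).filterMap _) = _
  rw [List.map_congr_left hval, List.filterMap_map]
  rfl

-- ===== VERDICT (by name: the statement is the Claim_ definition above) =====
theorem identify_roles_py_spec : Claim_equal_identify_roles_py := by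
  intro entities sentences _ _
  unfold Spec_identify_roles_py
  rw [pv_A_eq_canon, pv_B_eq_canon]
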